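-- pv_equiv track=rewrite | github.com/AustinBao/LeetCode | Contest/CCC/2021/Modern Art.py | modernArt
-- ===== SOURCE A (Python) =====
-- def modernArt(rows, columbs, num_brushes, brushes):
--     table = []
--     for i in range(0, rows):
--         new = []
--         for j in range(0, columbs):
--             new.append("B")
--         table.append(new)
--
--     final = []
--     for instructions in brushes:
--         if instructions == brushes[-1]:
--             if instructions[0] == "R":
--                 final.append(r_brush(table, instructions[1]))
--             if instructions[0] == "C":
--                 final.append(c_brush(table, instructions[1], rows))
--         else:
--             if instructions[0] == "R":
--                 table = r_brush(table, instructions[1])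
--             if instructions[0] == "C":
--                 table = c_brush(table, instructions[1], rows)
--
--     counter = 0
--     for rows in table:
--         for elements in rows:
--             if elements == "G":
--                 counter += 1
--
--     return counter
--
-- def c_brush(table, specific_columbs, rows):
--     for rows in table:
--         if rows[specific_columbs - 1] == "B":
--             rows[specific_columbs - 1] = "G"
--         else:
--             rows[specific_columbs - 1] = "B"
--
--     return table
--
-- def r_brush(table, specific_row):
--     temp = []
--     for i in table[specific_row - 1]:
--         if i == "G":
--             temp.append("B")
--         elif i == "B":
--             temp.append("G")
--
--     table[specific_row - 1] = temp
--
--     return table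
-- ===== SOURCE B (Python) =====
-- def modernArt(rows, columbs, num_brushes, brushes):
--     if rows <= 0 or columbs <= 0:
--         return 0
--     row_par = [0] * rows
--     col_par = [0] * columbs
--     for kind, idx in brushes:
--         if kind == "R":
--             row_par[(idx - 1) % rows] = 1 - row_par[(idx - 1) % rows]
--         elif kind == "C":
--             col_par[(idx - 1) % columbs] = 1 - col_par[(idx - 1) % columbs]
--     ro = sum(row_par)
--     co = sum(col_par)
--     return ro * (columbs - co) + (rows - ro) * co
-- ===== Notes on version B (the rewrite author's own statement) =====
-- stated objective: faster
-- what changed: B never builds or scans the grid: it accumulates per-row and per-column flip parities over the brushes and returns the closed-form count odd_rows*(columns-odd_cols) + (rows-odd_rows)*odd_cols.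
import Mathlib
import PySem

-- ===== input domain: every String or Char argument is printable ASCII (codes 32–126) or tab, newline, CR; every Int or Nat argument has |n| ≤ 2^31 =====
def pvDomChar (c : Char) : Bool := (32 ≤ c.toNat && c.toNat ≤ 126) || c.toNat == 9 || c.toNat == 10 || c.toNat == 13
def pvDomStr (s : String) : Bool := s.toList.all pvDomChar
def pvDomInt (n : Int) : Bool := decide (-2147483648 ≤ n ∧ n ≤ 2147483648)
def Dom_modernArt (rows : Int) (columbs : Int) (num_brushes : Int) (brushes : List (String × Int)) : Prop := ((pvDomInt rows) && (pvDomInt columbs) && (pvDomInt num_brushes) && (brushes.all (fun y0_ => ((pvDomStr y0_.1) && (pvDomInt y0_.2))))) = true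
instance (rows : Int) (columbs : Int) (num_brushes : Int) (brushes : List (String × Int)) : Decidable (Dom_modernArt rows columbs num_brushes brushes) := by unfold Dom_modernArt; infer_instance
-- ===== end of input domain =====

-- B replaces A's explicit grid simulation by per-row/per-column flip parities and a closed-form
-- count (gold = odd_rows*even_cols + even_rows*odd_cols); objective: faster.

-- ===== PORT A =====
-- r_brush: flip the (k)-th row (Python index k-1); none = IndexError
def rBrushA (table : List (List String)) (k : Int) : Option (List (List String)) :=
  match PySem.List.pyGet? table (k - 1) with
  | none => none
  | some row =>
    let temp := row.foldl (fun acc i =>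
      if i = "G" then acc ++ ["B"]
      else if i = "B" then acc ++ ["G"]
      else acc) ([] : List String)
    PySem.List.pySet? table (k - 1) temp

-- c_brush: flip cell k-1 of every row (its unused `rows` parameter is dropped); none = IndexError
def cBrushA (table : List (List String)) (k : Int) : Option (List (List String)) :=
  table.foldl (fun acc row =>
    acc.bind fun done =>
      (PySem.List.pyGet? row (k - 1)).bind fun v =>
        (PySem.List.pySet? row (k - 1) (if v = "B" then "G" else "B")).map
          fun row' => done ++ [row'])
    (some ([] : List (List String)))

def modernArt (rows : Int) (columbs : Int) (num_brushes : Int) (brushes : List (String × Int)) : Int :=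
  let table : List (List String) :=
    (PySem.List.pyRange 0 rows 1).foldl
      (fun t _ =>
        t ++ [(PySem.List.pyRange 0 columbs 1).foldl (fun nw _ => nw ++ ["B"]) []]) []
  -- state = (table, final); both branches mutate the same table object in Python
  let res : Option (List (List String) × List (List (List String))) :=
    brushes.foldl
      (fun st instructions =>
        st.bind fun tf =>
          if some instructions = PySem.List.pyGet? brushes (-1) then
            ((if instructions.1 = "R" then
                (rBrushA tf.1 instructions.2).map (fun t => (t, tf.2 ++ [t]))
              else some tf).bind fun tf1 =>
              if instructions.1 = "C" then
                (cBrushA tf1.1 instructions.2).map (fun t => (t, tf1.2 ++ [t]))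
              else some tf1)
          else
            ((if instructions.1 = "R" then
                (rBrushA tf.1 instructions.2).map (fun t => (t, tf.2))
              else some tf).bind fun tf1 =>
              if instructions.1 = "C" then
                (cBrushA tf1.1 instructions.2).map (fun t => (t, tf1.2))
              else some tf1))
      (some (table, []))
  match res with
  | none => 0  -- unreachable under Pre_modernArt (Python raises IndexError)
  | some tf =>
    tf.1.foldl (fun counter row =>
      row.foldl (fun c e => if e = "G" then c + 1 else c) counter) 0

-- ===== PORT B =====
def modernArt_alt (rows : Int) (columbs : Int) (num_brushes : Int) (brushes : List (String × Int)) : Int :=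
  if rows ≤ 0 ∨ columbs ≤ 0 then 0
  else
    let s := brushes.foldl
      (fun (s : List Int × List Int) p =>
        if p.1 = "R" then
          let i := (PySem.Int.mod (p.2 - 1) rows).toNat
          (s.1.set i (1 - s.1.getD i 0), s.2)
        else if p.1 = "C" then
          let j := (PySem.Int.mod (p.2 - 1) columbs).toNat
          (s.1, s.2.set j (1 - s.2.getD j 0))
        else s)
      (List.replicate rows.toNat 0, List.replicate columbs.toNat 0)
    let ro := s.1.sum
    let co := s.2.sum
    ro * (columbs - co) + (rows - ro) * co

-- ===== PRECONDITION & SPEC =====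
-- Pre_ excludes exactly the inputs on which A raises IndexError: an "R" brush whose index is out
-- of Python range for the rows (or no rows at all), and — when the table is non-empty — a "C"
-- brush whose index is out of Python range for the columns.
def Pre_modernArt (rows : Int) (columbs : Int) (num_brushes : Int) (brushes : List (String × Int)) : Prop :=
  ∀ p ∈ brushes,
    (p.1 = "R" → 0 < rows ∧ 1 - rows ≤ p.2 ∧ p.2 ≤ rows) ∧
    (p.1 = "C" → 0 < rows → 0 < columbs ∧ 1 - columbs ≤ p.2 ∧ p.2 ≤ columbs)
instance (rows : Int) (columbs : Int) (num_brushes : Int) (brushes : List (String × Int)) : Decidable (Pre_modernArt rows columbs num_brushes brushes) := by unfold Pre_modernArt; infer_instance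

def pvWitness_modernArt : Int × Int × Int × (List (String × Int)) := (3, 3, 2, [("R", 1), ("C", -2)])

def Spec_modernArt (rows : Int) (columbs : Int) (num_brushes : Int) (brushes : List (String × Int)) (out : Int) : Prop := out = modernArt_alt rows columbs num_brushes brushes
instance (rows : Int) (columbs : Int) (num_brushes : Int) (brushes : List (String × Int)) (out : Int) : Decidable (Spec_modernArt rows columbs num_brushes brushes out) := by unfold Spec_modernArt; infer_instance

-- ===== CLAIM (what is proved, stated in full; the proofs are below) =====
def Claim_equal_modernArt : Prop := ∀ (rows : Int) (columbs : Int) (num_brushes : Int) (brushes : List (String × Int)), Dom_modernArt rows columbs num_brushes brushes → Pre_modernArt rows columbs num_brushes brushes → Spec_modernArt rows columbs num_brushes brushes (modernArt rows columbs num_brushes brushes)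

-- ===== LEMMAS AND PROOFS =====

-- abstract one A-brush step (table component only)
def stepA (table : List (List String)) (p : String × Int) : Option (List (List String)) :=
  if p.1 = "R" then rBrushA table p.2
  else if p.1 = "C" then cBrushA table p.2
  else some table

-- B's loop body, named for the proofs (definitionally the lambda inside modernArt_alt)
def stepB (rows columbs : Int) (s : List Int × List Int) (p : String × Int) : List Int × List Int :=
  if p.1 = "R" then
    let i := (PySem.Int.mod (p.2 - 1) rows).toNat
    (s.1.set i (1 - s.1.getD i 0), s.2)
  else if p.1 = "C" then
    let j := (PySem.Int.mod (p.2 - 1) columbs).toNat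
    (s.1, s.2.set j (1 - s.2.getD j 0))
  else s

-- the table of B's parity state
def mkT (rp cp : List Int) : List (List String) :=
  rp.map (fun a => cp.map (fun b => if a = b then "B" else "G"))

def Bin (l : List Int) : Prop := ∀ x ∈ l, x = 0 ∨ x = 1

lemma idx_mod {α : Type} (xs : List α) (i R : Int) (h : (xs.length : Int) = R)
    (h1 : -R ≤ i) (h2 : i < R) :
    PySem.List.pyIdx? xs.length i = some ((PySem.Int.mod i R).toNat) ∧
    (PySem.Int.mod i R).toNat < xs.length := by
  have hpos : 0 < R := by omega
  rw [PySem.Int.mod_eq_emod_of_pos hpos]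
  have hb := Int.emod_nonneg i (by omega : R ≠ 0)
  have hlt := Int.emod_lt_of_pos i hpos
  constructor
  · simp only [PySem.List.pyIdx?]
    split_ifs with hi hn hm
    · rw [Int.emod_eq_of_lt hi h2]
    · exfalso; omega
    · have h3 : i % R = i + R := by
        calc i % R = (i + R) % R := (Int.add_emod_right i R).symm
        _ = i + R := Int.emod_eq_of_lt (by omega) (by omega)
      rw [h3]; congr 1; omega
    · exfalso; omega
  · omega

lemma pyGet_mod {α : Type} (xs : List α) (i R : Int) (h : (xs.length : Int) = R)
    (h1 : -R ≤ i) (h2 : i < R) :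
    ∃ hj : (PySem.Int.mod i R).toNat < xs.length,
      PySem.List.pyGet? xs i = some (xs[(PySem.Int.mod i R).toNat]) := by
  obtain ⟨hidx, hlt⟩ := idx_mod xs i R h h1 h2
  exact ⟨hlt, by simp [PySem.List.pyGet?, hidx, List.getElem?_eq_getElem hlt]⟩

lemma pySet_mod {α : Type} (xs : List α) (i R : Int) (v : α) (h : (xs.length : Int) = R)
    (h1 : -R ≤ i) (h2 : i < R) :
    PySem.List.pySet? xs i v = some (xs.set ((PySem.Int.mod i R).toNat) v) := by
  obtain ⟨hidx, _⟩ := idx_mod xs i R h h1 h2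
  simp [PySem.List.pySet?, hidx]


lemma flip_fold (l : List String) (h : ∀ x ∈ l, x = "B" ∨ x = "G") (acc : List String) :
    l.foldl (fun acc i => if i = "G" then acc ++ ["B"] else if i = "B" then acc ++ ["G"] else acc) acc
      = acc ++ l.map (fun x => if x = "G" then "B" else "G") := by
  induction l generalizing acc with
  | nil => simp
  | cons x t ih =>
    have ht : ∀ y ∈ t, y = "B" ∨ y = "G" := fun y hy => h y (by simp [hy])
    rcases h x (by simp) with rfl | rfl <;> simp [ih ht]

lemma flip_map (a : Int) (cp : List Int) (ha : a = 0 ∨ a = 1) (hcp : Bin cp) :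
    (cp.map (fun b => if a = b then "B" else "G")).map (fun x => if x = "G" then "B" else "G")
      = cp.map (fun b => if (1 - a) = b then "B" else "G") := by
  rw [List.map_map]
  apply List.map_congr_left
  intro b hb
  rcases ha with rfl | rfl <;> rcases hcp b hb with rfl | rfl <;> norm_num

lemma row_cells (a : Int) (cp : List Int) :
    ∀ x ∈ cp.map (fun b => if a = b then "B" else "G"), x = "B" ∨ x = "G" := by
  intro x hx
  obtain ⟨b, _, rfl⟩ := List.mem_map.mp hx
  split <;> simp

lemma rBrush_step (rows n : Int) (rp cp : List Int) (hlen : rp.length = rows.toNat)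
    (hr : 0 < rows) (h1 : 1 - rows ≤ n) (h2 : n ≤ rows) (hrp : Bin rp) (hcp : Bin cp) :
    rBrushA (mkT rp cp) n
      = some (mkT (rp.set ((PySem.Int.mod (n - 1) rows).toNat)
          (1 - rp.getD ((PySem.Int.mod (n - 1) rows).toNat) 0)) cp) := by
  have hlen' : ((mkT rp cp).length : Int) = rows := by simp [mkT, hlen]; omega
  obtain ⟨hj, hget⟩ := pyGet_mod (mkT rp cp) (n - 1) rows hlen' (by omega) (by omega)
  have hjr : (PySem.Int.mod (n - 1) rows).toNat < rp.length := by simpa [mkT] using hj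
  have hrow : (mkT rp cp)[(PySem.Int.mod (n - 1) rows).toNat]'hj
      = cp.map (fun b => if rp[(PySem.Int.mod (n - 1) rows).toNat]'hjr = b then "B" else "G") := by
    simp [mkT]
  have hset := pySet_mod (mkT rp cp) (n - 1) rows
      ((cp.map (fun b => if rp[(PySem.Int.mod (n - 1) rows).toNat]'hjr = b then "B" else "G")).map
        (fun x => if x = "G" then "B" else "G"))
      hlen' (by omega) (by omega)
  simp only [rBrushA, hget, hrow]
  rw [flip_fold _ (row_cells _ _)]
  simp only [List.nil_append]
  rw [hset]
  congr 1
  rw [flip_map (rp[(PySem.Int.mod (n - 1) rows).toNat]'hjr) cp (hrp _ (List.getElem_mem hjr)) hcp]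
  simp [mkT, List.map_set, List.getElem?_eq_getElem hjr]

lemma cRow_step (columbs n : Int) (a : Int) (cp : List Int) (hlen : cp.length = columbs.toNat)
    (hc : 0 < columbs) (h1 : 1 - columbs ≤ n) (h2 : n ≤ columbs) (ha : a = 0 ∨ a = 1) (hcp : Bin cp) :
    ((PySem.List.pyGet? (cp.map (fun b => if a = b then "B" else "G")) (n - 1)).bind fun v =>
      (PySem.List.pySet? (cp.map (fun b => if a = b then "B" else "G")) (n - 1)
          (if v = "B" then "G" else "B")).map fun row' => row')
      = some ((cp.set ((PySem.Int.mod (n - 1) columbs).toNat)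
          (1 - cp.getD ((PySem.Int.mod (n - 1) columbs).toNat) 0)).map
            (fun b => if a = b then "B" else "G")) := by
  have hlen' : ((cp.map (fun b => if a = b then "B" else "G")).length : Int) = columbs := by
    simp [hlen]; omega
  obtain ⟨hj, hget⟩ := pyGet_mod (cp.map (fun b => if a = b then "B" else "G")) (n - 1) columbs
      hlen' (by omega) (by omega)
  have hjc : (PySem.Int.mod (n - 1) columbs).toNat < cp.length := by simpa using hj
  have hget' : PySem.List.pyGet? (cp.map (fun b => if a = b then "B" else "G")) (n - 1)
      = some (if a = cp[(PySem.Int.mod (n - 1) columbs).toNat]'hjc then "B" else "G") := by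
    rw [hget]; congr 1; simp
  have hset := pySet_mod (cp.map (fun b => if a = b then "B" else "G")) (n - 1) columbs
      (if (if a = cp[(PySem.Int.mod (n - 1) columbs).toNat]'hjc then "B" else "G") = "B"
        then "G" else "B") hlen' (by omega) (by omega)
  rw [hget']
  simp only [Option.bind_some]
  rw [hset]
  simp only [Option.map_some]
  congr 1
  rw [List.map_set]
  congr 1
  rw [List.getD_eq_getElem cp 0 hjc]
  rcases ha with rfl | rfl <;> rcases hcp _ (List.getElem_mem hjc) with h01 | h01 <;>
    rw [h01] <;> norm_num

lemma cBrush_fold (columbs n : Int) (cp : List Int) (hlen : cp.length = columbs.toNat)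
    (hc : 0 < columbs) (h1 : 1 - columbs ≤ n) (h2 : n ≤ columbs) (hcp : Bin cp)
    (rp : List Int) (hrp : Bin rp) (done : List (List String)) :
    (mkT rp cp).foldl (fun acc row =>
        acc.bind fun done =>
          (PySem.List.pyGet? row (n - 1)).bind fun v =>
            (PySem.List.pySet? row (n - 1) (if v = "B" then "G" else "B")).map
              fun row' => done ++ [row']) (some done)
      = some (done ++ mkT rp (cp.set ((PySem.Int.mod (n - 1) columbs).toNat)
          (1 - cp.getD ((PySem.Int.mod (n - 1) columbs).toNat) 0))) := by
  induction rp generalizing done with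
  | nil => simp [mkT]
  | cons a t ih =>
    have ha := hrp a (by simp)
    have ht : Bin t := fun y hy => hrp y (by simp [hy])
    have hstep := cRow_step columbs n a cp hlen hc h1 h2 ha hcp
    have hcons : mkT (a :: t) cp = (cp.map (fun b => if a = b then "B" else "G")) :: mkT t cp := rfl
    rw [hcons, List.foldl_cons]
    have hstep' :
        ((some done).bind fun done =>
          (PySem.List.pyGet? (cp.map (fun b => if a = b then "B" else "G")) (n - 1)).bind fun v =>
            (PySem.List.pySet? (cp.map (fun b => if a = b then "B" else "G")) (n - 1)
                (if v = "B" then "G" else "B")).map fun row' => done ++ [row'])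
          = some (done ++ [(cp.set ((PySem.Int.mod (n - 1) columbs).toNat)
              (1 - cp.getD ((PySem.Int.mod (n - 1) columbs).toNat) 0)).map
                (fun b => if a = b then "B" else "G")]) := by
      simp only [Option.bind_some]
      cases hg : PySem.List.pyGet? (cp.map (fun b => if a = b then "B" else "G")) (n - 1) with
      | none => rw [hg] at hstep; simp at hstep
      | some v =>
        rw [hg] at hstep
        simp only [Option.bind_some] at hstep ⊢
        cases hs : PySem.List.pySet? (cp.map (fun b => if a = b then "B" else "G")) (n - 1)
            (if v = "B" then "G" else "B") with
        | none => rw [hs] at hstep; simp at hstep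
        | some r =>
          rw [hs] at hstep
          simp only [Option.map_some, Option.some_inj] at hstep
          simp [hstep]
    rw [hstep', ih ht (done ++ [_])]
    simp [mkT]

lemma cBrush_step (columbs n : Int) (rp cp : List Int) (hlen : cp.length = columbs.toNat)
    (hc : 0 < columbs) (h1 : 1 - columbs ≤ n) (h2 : n ≤ columbs) (hrp : Bin rp) (hcp : Bin cp) :
    cBrushA (mkT rp cp) n
      = some (mkT rp (cp.set ((PySem.Int.mod (n - 1) columbs).toNat)
          (1 - cp.getD ((PySem.Int.mod (n - 1) columbs).toNat) 0))) := by
  have := cBrush_fold columbs n cp hlen hc h1 h2 hcp rp hrp []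
  simpa [cBrushA] using this


lemma foldA_fst (L : Option (String × Int)) (l : List (String × Int))
    (st : Option (List (List String) × List (List (List String)))) :
    (l.foldl (fun st instructions =>
        st.bind fun tf =>
          if some instructions = L then
            ((if instructions.1 = "R" then
                (rBrushA tf.1 instructions.2).map (fun t => (t, tf.2 ++ [t]))
              else some tf).bind fun tf1 =>
              if instructions.1 = "C" then
                (cBrushA tf1.1 instructions.2).map (fun t => (t, tf1.2 ++ [t]))
              else some tf1)
          else
            ((if instructions.1 = "R" then
                (rBrushA tf.1 instructions.2).map (fun t => (t, tf.2))
              else some tf).bind fun tf1 =>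
              if instructions.1 = "C" then
                (cBrushA tf1.1 instructions.2).map (fun t => (t, tf1.2))
              else some tf1)) st).map Prod.fst
      = l.foldl (fun o p => o.bind fun tb => stepA tb p) (st.map Prod.fst) := by
  induction l generalizing st with
  | nil => rfl
  | cons p l ih =>
    rw [List.foldl_cons, List.foldl_cons, ih]
    have hfst : ∀ (o : Option (List (List String))) (g : List (List String) → List (List (List String))),
        Option.map (Prod.fst ∘ fun t => (t, g t)) o = o := by
      intro o g; cases o <;> rfl
    congr 1
    cases st with
    | none => rfl
    | some tf =>
      by_cases hR : p.1 = "R"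
      · have hC : ¬ p.1 = "C" := by rw [hR]; decide
        by_cases hL : some p = L <;>
          simp [stepA, hR, hC, hL, Option.map_map] <;> exact hfst _ _
      · by_cases hC : p.1 = "C"
        · by_cases hL : some p = L <;>
            simp [stepA, hR, hC, hL, Option.map_map] <;> exact hfst _ _
        · by_cases hL : some p = L <;> simp [stepA, hR, hC, hL]

lemma main_inv (rows columbs : Int) (hr : 0 < rows) (l : List (String × Int))
    (hpre : ∀ p ∈ l, (p.1 = "R" → 0 < rows ∧ 1 - rows ≤ p.2 ∧ p.2 ≤ rows) ∧
      (p.1 = "C" → 0 < rows → 0 < columbs ∧ 1 - columbs ≤ p.2 ∧ p.2 ≤ columbs))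
    (rp cp : List Int) (hrp : Bin rp) (hcp : Bin cp)
    (hrl : rp.length = rows.toNat) (hcl : cp.length = columbs.toNat) :
    l.foldl (fun o p => o.bind fun tb => stepA tb p) (some (mkT rp cp))
      = some (mkT (l.foldl (stepB rows columbs) (rp, cp)).1 (l.foldl (stepB rows columbs) (rp, cp)).2)
    ∧ Bin (l.foldl (stepB rows columbs) (rp, cp)).1 ∧ Bin (l.foldl (stepB rows columbs) (rp, cp)).2
    ∧ (l.foldl (stepB rows columbs) (rp, cp)).1.length = rows.toNat
    ∧ (l.foldl (stepB rows columbs) (rp, cp)).2.length = columbs.toNat := by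
  induction l generalizing rp cp with
  | nil => exact ⟨rfl, hrp, hcp, hrl, hcl⟩
  | cons p l ih =>
    obtain ⟨hRp, hCp⟩ := hpre p (by simp)
    have hpre' : ∀ q ∈ l, (q.1 = "R" → 0 < rows ∧ 1 - rows ≤ q.2 ∧ q.2 ≤ rows) ∧
        (q.1 = "C" → 0 < rows → 0 < columbs ∧ 1 - columbs ≤ q.2 ∧ q.2 ≤ columbs) :=
      fun q hq => hpre q (by simp [hq])
    simp only [List.foldl_cons, Option.bind_some]
    by_cases hR : p.1 = "R"
    · obtain ⟨-, hb1, hb2⟩ := hRp hR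
      have hi : (PySem.Int.mod (p.2 - 1) rows).toNat < rp.length := by
        have h1 := PySem.Int.mod_nonneg (p.2 - 1) hr
        have h2 := PySem.Int.mod_lt (p.2 - 1) hr
        omega
      have hstepB : stepB rows columbs (rp, cp) p
          = (rp.set ((PySem.Int.mod (p.2 - 1) rows).toNat)
              (1 - rp.getD ((PySem.Int.mod (p.2 - 1) rows).toNat) 0), cp) := by
        simp [stepB, hR]
      have hstepA : stepA (mkT rp cp) p
          = some (mkT (rp.set ((PySem.Int.mod (p.2 - 1) rows).toNat)
              (1 - rp.getD ((PySem.Int.mod (p.2 - 1) rows).toNat) 0)) cp) := by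
        simp only [stepA, hR, if_pos]
        exact rBrush_step rows p.2 rp cp hrl hr hb1 hb2 hrp hcp
      have hBin' : Bin (rp.set ((PySem.Int.mod (p.2 - 1) rows).toNat)
          (1 - rp.getD ((PySem.Int.mod (p.2 - 1) rows).toNat) 0)) := by
        intro x hx
        rcases List.mem_or_eq_of_mem_set hx with hx' | rfl
        · exact hrp x hx'
        · rw [List.getD_eq_getElem rp 0 hi]
          rcases hrp _ (List.getElem_mem hi) with h01 | h01 <;> omega
      rw [hstepA, hstepB]
      exact ih hpre' _ _ hBin' hcp (by simpa using hrl) hcl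
    · by_cases hC : p.1 = "C"
      · obtain ⟨hc, hb1, hb2⟩ := hCp hC hr
        have hj : (PySem.Int.mod (p.2 - 1) columbs).toNat < cp.length := by
          have h1 := PySem.Int.mod_nonneg (p.2 - 1) hc
          have h2 := PySem.Int.mod_lt (p.2 - 1) hc
          omega
        have hstepB : stepB rows columbs (rp, cp) p
            = (rp, cp.set ((PySem.Int.mod (p.2 - 1) columbs).toNat)
                (1 - cp.getD ((PySem.Int.mod (p.2 - 1) columbs).toNat) 0)) := by
          simp [stepB, hR, hC]
        have hstepA : stepA (mkT rp cp) p
            = some (mkT rp (cp.set ((PySem.Int.mod (p.2 - 1) columbs).toNat)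
                (1 - cp.getD ((PySem.Int.mod (p.2 - 1) columbs).toNat) 0))) := by
          simp only [stepA, hR, hC, if_pos, if_neg]
          exact cBrush_step columbs p.2 rp cp hcl hc hb1 hb2 hrp hcp
        have hBin' : Bin (cp.set ((PySem.Int.mod (p.2 - 1) columbs).toNat)
            (1 - cp.getD ((PySem.Int.mod (p.2 - 1) columbs).toNat) 0)) := by
          intro x hx
          rcases List.mem_or_eq_of_mem_set hx with hx' | rfl
          · exact hcp x hx'
          · rw [List.getD_eq_getElem cp 0 hj]
            rcases hcp _ (List.getElem_mem hj) with h01 | h01 <;> omega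
        rw [hstepA, hstepB]
        exact ih hpre' _ _ hrp hBin' hrl (by simpa using hcl)
      · have hstepB : stepB rows columbs (rp, cp) p = (rp, cp) := by simp [stepB, hR, hC]
        have hstepA : stepA (mkT rp cp) p = some (mkT rp cp) := by simp [stepA, hR, hC]
        rw [hstepA, hstepB]
        exact ih hpre' _ _ hrp hcp hrl hcl

lemma inner_cnt (a : Int) (cp : List Int) (ha : a = 0 ∨ a = 1) (hcp : Bin cp) :
    (((cp.map (fun b => if a = b then "B" else "G")).countP (fun x => decide (x = "G"))) : Int)
      = if a = 1 then (cp.length : Int) - cp.sum else cp.sum := by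
  induction cp with
  | nil => rcases ha with rfl | rfl <;> simp
  | cons b t ih =>
    have hb := hcp b (by simp)
    have ht : Bin t := fun y hy => hcp y (by simp [hy])
    have iht := ih ht
    simp only [List.map_cons, List.countP_cons, List.sum_cons, List.length_cons]
    rcases ha with rfl | rfl <;> rcases hb with rfl | rfl <;>
      simp_all <;> push_cast <;> ring_nf <;> omega

lemma sum_cnt (rp : List Int) (C S : Int) (hrp : Bin rp) :
    (rp.map (fun a => if a = 1 then C - S else S)).sum
      = rp.sum * (C - S) + ((rp.length : Int) - rp.sum) * S := by
  induction rp with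
  | nil => simp
  | cons a t ih =>
    have ha := hrp a (by simp)
    have ht : Bin t := fun y hy => hrp y (by simp [hy])
    simp only [List.map_cons, List.sum_cons, List.length_cons]
    rw [ih ht]
    rcases ha with rfl | rfl <;> push_cast <;> ring

lemma countA (rp cp : List Int) (hrp : Bin rp) (hcp : Bin cp) :
    (mkT rp cp).foldl (fun counter row =>
        row.foldl (fun c e => if e = "G" then c + 1 else c) counter) (0 : Int)
      = rp.sum * ((cp.length : Int) - cp.sum) + ((rp.length : Int) - rp.sum) * cp.sum := by
  simp only [PySem.List.foldl_ite_add_one]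
  rw [mkT, List.foldl_map]
  rw [PySem.List.foldl_add
      (g := fun a => (((cp.map (fun b => if a = b then "B" else "G")).countP
        (fun x => decide (x = "G"))) : Int))]
  have hmapc : rp.map (fun a => (((cp.map (fun b => if a = b then "B" else "G")).countP
        (fun x => decide (x = "G"))) : Int))
      = rp.map (fun a => if a = 1 then (cp.length : Int) - cp.sum else cp.sum) :=
    List.map_congr_left (fun a ha => inner_cnt a cp (hrp a ha) hcp)
  rw [hmapc, sum_cnt rp _ _ hrp]
  ring

lemma fold_nil_table (rows columbs : Int) (hr : rows ≤ 0) (l : List (String × Int))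
    (hpre : ∀ p ∈ l, (p.1 = "R" → 0 < rows ∧ 1 - rows ≤ p.2 ∧ p.2 ≤ rows) ∧
      (p.1 = "C" → 0 < rows → 0 < columbs ∧ 1 - columbs ≤ p.2 ∧ p.2 ≤ columbs)) :
    l.foldl (fun o p => o.bind fun tb => stepA tb p) (some ([] : List (List String))) = some [] := by
  induction l with
  | nil => rfl
  | cons p l ih =>
    obtain ⟨hRp, -⟩ := hpre p (by simp)
    have hpre' : ∀ q ∈ l, (q.1 = "R" → 0 < rows ∧ 1 - rows ≤ q.2 ∧ q.2 ≤ rows) ∧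
        (q.1 = "C" → 0 < rows → 0 < columbs ∧ 1 - columbs ≤ q.2 ∧ q.2 ≤ columbs) :=
      fun q hq => hpre q (by simp [hq])
    have hstepA : stepA ([] : List (List String)) p = some [] := by
      by_cases hR : p.1 = "R"
      · exact absurd (hRp hR).1 (by omega)
      · by_cases hC : p.1 = "C" <;> simp [stepA, hR, hC, cBrushA]
    simp only [List.foldl_cons, Option.bind_some]
    rw [hstepA]
    exact ih hpre'

lemma table0_eq (rows columbs : Int) :
    (PySem.List.pyRange 0 rows 1).foldl
      (fun t _ => t ++ [(PySem.List.pyRange 0 columbs 1).foldl (fun nw _ => nw ++ ["B"]) []]) []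
      = mkT (List.replicate rows.toNat 0) (List.replicate columbs.toNat 0) := by
  rw [PySem.List.foldl_append_singleton_eq_map, PySem.List.foldl_append_singleton_eq_map]
  simp [PySem.List.pyRange_one, mkT, List.map_replicate, Function.comp_def, List.map_const', List.length_range]

theorem modernArt_spec : Claim_equal_modernArt := by
  intro rows columbs num_brushes brushes _ hpre
  unfold Spec_modernArt
  unfold Pre_modernArt at hpre
  have halt : modernArt_alt rows columbs num_brushes brushes
      = if rows ≤ 0 ∨ columbs ≤ 0 then 0
        else
          (fun s : List Int × List Int =>
            s.1.sum * (columbs - s.2.sum) + (rows - s.1.sum) * s.2.sum)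
          (brushes.foldl (stepB rows columbs)
            (List.replicate rows.toNat 0, List.replicate columbs.toNat 0)) := rfl
  by_cases hr : 0 < rows
  · have hrp0 : Bin (List.replicate rows.toNat (0 : Int)) :=
      fun x hx => Or.inl (List.eq_of_mem_replicate hx)
    have hcp0 : Bin (List.replicate columbs.toNat (0 : Int)) :=
      fun x hx => Or.inl (List.eq_of_mem_replicate hx)
    obtain ⟨hfold, hb1, hb2, hl1, hl2⟩ :=
      main_inv rows columbs hr brushes hpre _ _ hrp0 hcp0 (by simp) (by simp)
    have hff := foldA_fst (PySem.List.pyGet? brushes (-1)) brushes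
        (some (mkT (List.replicate rows.toNat 0) (List.replicate columbs.toNat 0), []))
    simp only [Option.map_some] at hff
    rw [hfold] at hff
    obtain ⟨tf, htf, hfst⟩ := Option.map_eq_some_iff.mp hff
    unfold modernArt
    simp only [table0_eq rows columbs]
    rw [htf]
    simp only [hfst]
    rw [countA _ _ hb1 hb2, halt]
    by_cases hc : 0 < columbs
    · rw [if_neg (by omega)]
      rw [hl1, hl2]
      have h1 : ((rows.toNat : Nat) : Int) = rows := by omega
      have h2 : ((columbs.toNat : Nat) : Int) = columbs := by omega
      rw [h1, h2]
    · rw [if_pos (Or.inr (by omega))]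
      have h2 : (brushes.foldl (stepB rows columbs)
          (List.replicate rows.toNat 0, List.replicate columbs.toNat 0)).2 = [] := by
        apply List.eq_nil_of_length_eq_zero
        omega
      rw [h2]
      simp
  · unfold modernArt
    have hrange : PySem.List.pyRange 0 rows 1 = [] := by
      rw [PySem.List.pyRange_one]
      simp
      omega
    simp only [hrange, List.foldl_nil]
    have hff := foldA_fst (PySem.List.pyGet? brushes (-1)) brushes
        (some (([] : List (List String)), []))
    simp only [Option.map_some] at hff
    rw [fold_nil_table rows columbs (by omega) brushes hpre] at hff
    obtain ⟨tf, htf, hfst⟩ := Option.map_eq_some_iff.mp hff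
    rw [htf]
    simp only [hfst]
    rw [halt, if_pos (Or.inl (by omega))]
    simp
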